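-- pv_equiv track=rewrite | github.com/tejasborde/DSA-Problems | String/Problem-6.py | checkifStringOneisShuffledSubStringOfStringTwo
-- ===== SOURCE A (Python) =====
-- def createCountDict(s):
--     d={}
--     for i in s:
--         if(i not in d):
--             d[i]=1
--         else:
--             d[i]+=1
--     return d
--
-- def checkifStringOneisShuffledSubStringOfStringTwo(s1,s2):
--     m=len(s1)
--     n=len(s2)
--
--     if(m>n):
--         return 0
--     s1=sorted(s1)
--     s1Dict=createCountDict(s1)
--
--     tempS2=s2[:m]
--     s2Dict=createCountDict(tempS2)
--     if(s2Dict==s1Dict):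
--         return 1
--     else:
--         start=1
--         while(start<n-m+1):
--             curString=s2[start:start+m]
--             curStringdict=createCountDict(curString)
--             if(s1Dict==curStringdict):
--                 return 1
--             start+=1
--         return 0
-- ===== SOURCE B (Python) =====
-- def checkifStringOneisShuffledSubStringOfStringTwo(s1, s2):
--     m = len(s1)
--     n = len(s2)
--     if m > n:
--         return 0
--     need = {}
--     for c in s1:
--         need[c] = need.get(c, 0) + 1
--     window = {}
--     for c in s2[:m]:
--         window[c] = window.get(c, 0) + 1
--     if window == need:
--         return 1
--     for i in range(m, n):
--         c = s2[i]
--         window[c] = window.get(c, 0) + 1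
--         d = s2[i - m]
--         window[d] = window.get(d, 0) - 1
--         if window[d] == 0:
--             del window[d]
--         if window == need:
--             return 1
--     return 0
-- ===== Notes on version B (the rewrite author's own statement) =====
-- stated objective: faster
-- what changed: Replaces rebuilding and comparing a fresh count dict for every window of s2 (plus sorting s1) with a single sliding window whose count dict is updated incrementally by one insert/decrement per step.
import Mathlib
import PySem

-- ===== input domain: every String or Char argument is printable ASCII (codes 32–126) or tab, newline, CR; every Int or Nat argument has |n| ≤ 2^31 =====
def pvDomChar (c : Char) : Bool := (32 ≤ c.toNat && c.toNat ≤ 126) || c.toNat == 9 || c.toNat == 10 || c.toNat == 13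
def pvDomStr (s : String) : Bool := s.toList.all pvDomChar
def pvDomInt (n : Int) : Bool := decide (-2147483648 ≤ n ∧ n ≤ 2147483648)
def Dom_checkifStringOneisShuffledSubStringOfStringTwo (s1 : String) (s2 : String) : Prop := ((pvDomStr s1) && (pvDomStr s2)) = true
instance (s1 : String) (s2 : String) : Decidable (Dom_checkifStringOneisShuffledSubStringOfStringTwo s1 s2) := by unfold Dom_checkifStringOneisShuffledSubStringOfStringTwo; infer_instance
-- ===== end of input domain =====

-- B replaces A's per-window recount (a fresh count dict built and compared for every window of s2,
-- plus a sort of s1) with one sliding window whose count dict is updated incrementally; objective: faster.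

-- Python's `d1 == d2` on dicts ignores insertion order: the dicts are equal iff they hold the same
-- key→value pairs.  With unique keys this is: same size, and every pair of d1 is found in d2.
-- Used by both ports (it models the builtin `==`, not part of either algorithm).
def pvPyDictEq (d1 d2 : PySem.Dict Char Int) : Bool :=
  d1.size == d2.size && d1.items.all (fun p => d2.get? p.1 == some p.2)

-- ===== PORT A =====
-- createCountDict(s): for i in s: if i not in d: d[i]=1 else: d[i]+=1
def pvCreateCountDict (s : List Char) : PySem.Dict Char Int :=
  s.foldl (fun d i => if d.contains i = false then d.insert i 1 else d.modify i 0 (· + 1)) PySem.Dict.empty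

-- the `while(start < n-m+1)` loop (reached only when m ≤ n, so Nat subtraction is exact)
def pvAWhile (s1Dict : PySem.Dict Char Int) (t2 : List Char) (m n start : Nat) : Int :=
  if start < n - m + 1 then
    let curString := PySem.List.slice t2 (some (start : Int)) (some ((start : Int) + (m : Int)))
    if pvPyDictEq s1Dict (pvCreateCountDict curString) then 1
    else pvAWhile s1Dict t2 m n (start + 1)
  else 0
termination_by n - m + 1 - start

def checkifStringOneisShuffledSubStringOfStringTwo (s1 : String) (s2 : String) : Int :=
  let t1 := s1.toList
  let t2 := s2.toList
  let m := t1.length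
  let n := t2.length
  if m > n then 0
  else
    let s1s := PySem.List.sorted t1 (fun c => c) false
    let s1Dict := pvCreateCountDict s1s
    let tempS2 := PySem.List.slice t2 none (some (m : Int))
    let s2Dict := pvCreateCountDict tempS2
    if pvPyDictEq s2Dict s1Dict then 1
    else pvAWhile s1Dict t2 m n 1

-- ===== PORT B =====
-- the `for i in range(m, n)` loop with its sliding count dict
def pvBLoop (need : PySem.Dict Char Int) (t2 : List Char) (m : Nat) (window : PySem.Dict Char Int) (i n : Nat) : Int :=
  if i < n then
    let c := PySem.List.pyGetD t2 (i : Int) ' '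
    let w1 := window.insert c (window.getD c 0 + 1)
    let d := PySem.List.pyGetD t2 ((i : Int) - (m : Int)) ' '
    let w2 := w1.insert d (w1.getD d 0 - 1)
    let w3 := if w2.getD d 0 == 0 then w2.erase d else w2
    if pvPyDictEq w3 need then 1
    else pvBLoop need t2 m w3 (i + 1) n
  else 0
termination_by n - i

def checkifStringOneisShuffledSubStringOfStringTwo_alt (s1 : String) (s2 : String) : Int :=
  let t1 := s1.toList
  let t2 := s2.toList
  let m := t1.length
  let n := t2.length
  if m > n then 0
  else
    let need := t1.foldl (fun d c => d.insert c (d.getD c 0 + 1)) PySem.Dict.empty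
    let window := (PySem.List.slice t2 none (some (m : Int))).foldl
      (fun d c => d.insert c (d.getD c 0 + 1)) PySem.Dict.empty
    if pvPyDictEq window need then 1
    else pvBLoop need t2 m window m n

-- ===== PRECONDITION & SPEC =====
def Spec_checkifStringOneisShuffledSubStringOfStringTwo (s1 : String) (s2 : String) (out : Int) : Prop := out = checkifStringOneisShuffledSubStringOfStringTwo_alt s1 s2
instance (s1 : String) (s2 : String) (out : Int) : Decidable (Spec_checkifStringOneisShuffledSubStringOfStringTwo s1 s2 out) := by unfold Spec_checkifStringOneisShuffledSubStringOfStringTwo; infer_instance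

-- ===== CLAIM (what is proved, stated in full; the proofs are below) =====
def Claim_equal_checkifStringOneisShuffledSubStringOfStringTwo : Prop := ∀ (s1 : String) (s2 : String), Dom_checkifStringOneisShuffledSubStringOfStringTwo s1 s2 → Spec_checkifStringOneisShuffledSubStringOfStringTwo s1 s2 (checkifStringOneisShuffledSubStringOfStringTwo s1 s2)

-- ===== LEMMAS AND PROOFS =====

-- A count dict d faithfully represents the multiset s.
def pvInv (d : PySem.Dict Char Int) (s : Multiset Char) : Prop :=
  d.keys.Nodup ∧ (∀ c, d.getD c 0 = s.count c) ∧ (∀ c, d.contains c = true ↔ c ∈ s)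
theorem pvCreateCountDict_eq (s : List Char) : pvCreateCountDict s = PySem.Dict.counter s := by
  unfold pvCreateCountDict
  rw [PySem.Dict.counter_eq_foldl]
  apply PySem.List.foldl_congr_mem
  intro d x hx
  by_cases h : d.contains x = true
  · simp [h, PySem.Dict.modify]
  · simp only [Bool.not_eq_true] at h
    rw [PySem.Dict.modify, PySem.Dict.getD_of_not_contains d 0 h]
    simp [h]
theorem pvInv_counter (l : List Char) : pvInv (PySem.Dict.counter l) (Multiset.ofList l) := by
  refine ⟨PySem.Dict.nodup_keys_counter l, fun c => ?_, fun c => ?_⟩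
  · rw [PySem.Dict.getD_counter]; simp
  · rw [PySem.Dict.contains_counter]; simp
theorem pvInv_get? {d : PySem.Dict Char Int} {s : Multiset Char} (h : pvInv d s) {c : Char}
    (hc : c ∈ s) : d.get? c = some ((s.count c : Int)) := by
  obtain ⟨hnd, hgetD, hcont⟩ := h
  have h1 : d.contains c = true := (hcont c).mpr hc
  rw [PySem.Dict.contains_eq_isSome_get?] at h1
  obtain ⟨v, hv⟩ := Option.isSome_iff_exists.mp h1
  have := hgetD c
  rw [PySem.Dict.getD_eq_get?_getD, hv] at this
  simp at this
  rw [hv, this]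

theorem pvInv_keys_mem {d : PySem.Dict Char Int} {s : Multiset Char} (h : pvInv d s) (c : Char) :
    c ∈ d.keys ↔ c ∈ s := by
  rw [← PySem.Dict.contains_iff_mem_keys]; exact h.2.2 c

theorem pvPyDictEq_iff {d1 d2 : PySem.Dict Char Int} {s1 s2 : Multiset Char}
    (h1 : pvInv d1 s1) (h2 : pvInv d2 s2) : pvPyDictEq d1 d2 = true ↔ s1 = s2 := by
  unfold pvPyDictEq
  simp only [Bool.and_eq_true, beq_iff_eq, List.all_eq_true]
  constructor
  · rintro ⟨hsize, hall⟩
    -- d1.keys ⊆ d2.keys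
    have hsub : d1.keys ⊆ d2.keys := by
      intro k hk
      obtain ⟨⟨k', v⟩, hpm, rfl⟩ := List.mem_map.mp hk
      have := hall _ hpm
      rw [← PySem.Dict.contains_iff_mem_keys, PySem.Dict.contains_eq_isSome_get?, this]
      rfl
    -- equal key sets
    have hlen : d1.keys.length = d2.keys.length := by
      simpa [PySem.Dict.keys, List.length_map] using hsize
    have hsub2 : d2.keys ⊆ d1.keys := by
      have hc1 : d1.keys.toFinset ⊆ d2.keys.toFinset := by
        intro a ha; simp only [List.mem_toFinset] at *; exact hsub ha
      have hcard : d2.keys.toFinset.card ≤ d1.keys.toFinset.card := by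
        rw [List.toFinset_card_of_nodup h1.1, List.toFinset_card_of_nodup h2.1, hlen]
      have := Finset.eq_of_subset_of_card_le hc1 hcard
      intro a ha
      have : a ∈ d1.keys.toFinset := by rw [this]; simpa using ha
      simpa using this
    ext c
    by_cases hc : c ∈ s1
    · have hg1 : d1.get? c = some ((s1.count c : Int)) := pvInv_get? h1 hc
      have hmem := PySem.Dict.mem_items_of_get?_eq_some d1 hg1
      have hget2 := hall _ hmem
      have hD := h2.2.1 c
      rw [PySem.Dict.getD_eq_get?_getD] at hD
      rw [hget2] at hD
      simpa using hD
    · have hns1 : s1.count c = 0 := Multiset.count_eq_zero.mpr hc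
      have hns2 : s2.count c = 0 := by
        rw [Multiset.count_eq_zero]
        intro hin
        exact hc ((pvInv_keys_mem h1 c).mp (hsub2 ((pvInv_keys_mem h2 c).mpr hin)))
      rw [hns1, hns2]
  · rintro rfl
    constructor
    · have hperm : d1.keys.Perm d2.keys := by
        rw [List.perm_ext_iff_of_nodup h1.1 h2.1]
        intro a; rw [pvInv_keys_mem h1, pvInv_keys_mem h2]
      simpa [PySem.Dict.keys, List.length_map] using hperm.length_eq
    · rintro ⟨k, v⟩ hp
      have hk : k ∈ s1 := (pvInv_keys_mem h1 k).mp (List.mem_map.mpr ⟨(k, v), hp, rfl⟩)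
      have hg1 : d1.get? k = some v := PySem.Dict.get?_of_mem_items d1 hp h1.1
      have hv : v = ((s1.count k : Int)) := by
        have := pvInv_get? h1 hk; rw [hg1] at this; exact (Option.some.injEq _ _).mp this
      rw [pvInv_get? h2 hk, hv]
theorem pv_find?_filter_ne (k k' : Char) (l : List (Char × Int)) :
    (l.filter (fun p => !p.1 == k)).find? (fun p => p.1 == k')
      = if k' = k then none else l.find? (fun p => p.1 == k') := by
  induction l with
  | nil => simp
  | cons p t ih =>
    by_cases h1 : p.1 = k
    · have hf : List.filter (fun p => !p.1 == k) (p :: t) = List.filter (fun p => !p.1 == k) t := by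
        simp [h1]
      rw [hf, ih]
      split_ifs with h2
      · rfl
      · rw [List.find?_cons_of_neg (by simp; intro hh; exact h2 ((h1.symm.trans hh).symm))]
    · simp only [List.filter_cons]
      rw [if_pos (by simp [h1])]
      by_cases h2 : p.1 = k'
      · rw [List.find?_cons_of_pos (by simp [h2]), List.find?_cons_of_pos (by simp [h2])]
        rw [if_neg (by rintro rfl; exact h1 h2)]
      · rw [List.find?_cons_of_neg (by simp [h2]), List.find?_cons_of_neg (by simp [h2]), ih]

theorem pv_get?_erase (d : PySem.Dict Char Int) (k k' : Char) :
    (d.erase k).get? k' = if k' = k then none else d.get? k' := by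
  show Option.map _ ((d.items.filter _).find? _) = _
  rw [pv_find?_filter_ne]
  split_ifs <;> rfl

theorem pv_nodup_keys_erase (d : PySem.Dict Char Int) (k : Char) (h : d.keys.Nodup) :
    (d.erase k).keys.Nodup := by
  have hs : (d.erase k).keys.Sublist d.keys := List.Sublist.map _ List.filter_sublist
  exact h.sublist hs

theorem pvInv_step (d : PySem.Dict Char Int) (s : Multiset Char) (h : pvInv d s) (c e : Char)
    (he : e ∈ s + {c}) :
    pvInv (let w1 := d.insert c (d.getD c 0 + 1)
           let w2 := w1.insert e (w1.getD e 0 - 1)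
           if w2.getD e 0 == 0 then w2.erase e else w2)
          (s + {c} - {e}) := by
  obtain ⟨hnd, hg, hcon⟩ := h
  simp only []
  set w1 := d.insert c (d.getD c 0 + 1) with hw1
  set w2 := w1.insert e (w1.getD e 0 - 1) with hw2
  have hg1 : ∀ x, w1.getD x 0 = ((s + {c}).count x : Int) := by
    intro x
    rw [hw1, PySem.Dict.getD_insert]
    split_ifs with hx
    · subst hx; rw [hg]; push_cast [Multiset.count_add, Multiset.count_singleton]; simp
    · rw [hg]; push_cast [Multiset.count_add, Multiset.count_singleton, hx]; simp
  have hc1 : ∀ x, w1.contains x = true ↔ x ∈ s + {c} := by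
    intro x
    rw [hw1, PySem.Dict.contains_insert]
    simp [hcon, Multiset.mem_add, or_comm]
  have hn1 : w1.keys.Nodup := PySem.Dict.nodup_keys_insert _ _ _ hnd
  have hcnt : 1 ≤ (s + {c}).count e := Multiset.one_le_count_iff_mem.mpr he
  have hg2 : ∀ x, w2.getD x 0 = if x = e then ((s + {c}).count e : Int) - 1 else ((s + {c}).count x : Int) := by
    intro x
    rw [hw2, PySem.Dict.getD_insert]
    split_ifs with hx
    · rw [hg1]
    · rw [hg1]
  have hc2 : ∀ x, w2.contains x = true ↔ x ∈ s + {c} := by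
    intro x
    rw [hw2, PySem.Dict.contains_insert]
    simp only [Bool.or_eq_true, beq_iff_eq, hc1]
    constructor
    · rintro (rfl | hx)
      · exact he
      · exact hx
    · exact Or.inr
  have hn2 : w2.keys.Nodup := PySem.Dict.nodup_keys_insert _ _ _ hn1
  have hcount : ∀ x, (s + {c} - {e}).count x = (s + {c}).count x - (if x = e then 1 else 0) := by
    intro x
    rw [Multiset.count_sub, Multiset.count_singleton]
  by_cases hz : w2.getD e 0 == 0
  · rw [if_pos hz]
    have h1 : ((s + {c}).count e : Int) - 1 = 0 := by
      have := hg2 e; rw [if_pos rfl] at this; rw [← this]; exact beq_iff_eq.mp hz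
    have hone : (s + {c}).count e = 1 := by omega
    refine ⟨pv_nodup_keys_erase _ _ hn2, fun x => ?_, fun x => ?_⟩
    · rw [PySem.Dict.getD_eq_get?_getD, pv_get?_erase, hcount x]
      split_ifs with hx
      · subst hx; rw [hone]; rfl
      · rw [← PySem.Dict.getD_eq_get?_getD, hg2, if_neg hx]; simp
    · rw [PySem.Dict.contains_eq_isSome_get?, pv_get?_erase]
      split_ifs with hx
      · subst hx
        simp only [Option.isSome_none]
        rw [← Multiset.one_le_count_iff_mem, hcount]
        simp [hone]
      · rw [← PySem.Dict.contains_eq_isSome_get?, hc2]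
        rw [← Multiset.one_le_count_iff_mem, ← Multiset.one_le_count_iff_mem, hcount]
        simp [hx]
  · rw [if_neg (by simpa using hz)]
    have h1 : ((s + {c}).count e : Int) - 1 ≠ 0 := by
      have := hg2 e; rw [if_pos rfl] at this; rw [← this]; simpa using hz
    have htwo : 2 ≤ (s + {c}).count e := by omega
    refine ⟨hn2, fun x => ?_, fun x => ?_⟩
    · rw [hg2, hcount x]
      split_ifs with hx
      · subst hx; push_cast [Nat.cast_sub hcnt]; ring
      · simp
    · rw [hc2, ← Multiset.one_le_count_iff_mem, ← Multiset.one_le_count_iff_mem, hcount]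
      split_ifs with hx
      · subst hx; omega
      · omega

-- the window at start index i matches s1 (A's orientation: the multiset of s1 on the left)
def pvQ (t1 t2 : List Char) (m : Nat) (i : Nat) : Bool :=
  decide ((Multiset.ofList t1) = Multiset.ofList ((t2.drop i).take m))

theorem pv_window_slide (t2 : List Char) (m i : Nat) (hm : m ≤ i) (hi : i < t2.length) :
    Multiset.ofList ((t2.drop (i - m + 1)).take m)
      = Multiset.ofList ((t2.drop (i - m)).take m) + {t2[i]} - {t2[i - m]} := by
  cases m with
  | zero =>
    simp only [List.take_zero, Multiset.coe_nil, zero_add]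
    show (0 : Multiset Char) = ({t2[i]} : Multiset Char) - {t2[i]}
    rw [tsub_self]
  | succ k =>
    set j := i - (k + 1) with hj
    have hij : i = j + (k + 1) := by omega
    have hjlen : j < t2.length := by omega
    have h1 : t2.drop j = t2[j] :: t2.drop (j + 1) := List.drop_eq_getElem_cons hjlen
    have h2 : (t2.drop (j + 1)).take (k + 1) = (t2.drop (j + 1)).take k ++ [t2[i]] := by
      rw [List.take_add_one]
      congr 1
      rw [List.getElem?_drop]
      have hidx : j + 1 + k = i := by omega
      rw [hidx, List.getElem?_eq_getElem hi]
      rfl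
    rw [h1, h2]
    rw [List.take_succ_cons]
    have hsplit : (Multiset.ofList (t2[j] :: (t2.drop (j + 1)).take k))
        = {t2[j]} + Multiset.ofList ((t2.drop (j + 1)).take k) := by
      rw [← Multiset.cons_coe, Multiset.singleton_add]
    rw [hsplit]
    have h3 : Multiset.ofList ((t2.drop (j + 1)).take k ++ [t2[i]])
        = Multiset.ofList ((t2.drop (j + 1)).take k) + {t2[i]} := by
      ext x
      by_cases hx : x = t2[i]
      · subst hx; simp [List.count_append]
      · simp [List.count_append, hx, List.count_singleton]
        exact fun hh => hx hh.symm
    rw [h3]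
    have hjj : t2[i - (k + 1)] = t2[j] := rfl
    rw [hjj, add_comm ({t2[j]}) (Multiset.ofList ((t2.drop (j + 1)).take k)), add_assoc,
      add_comm ({t2[j]}) ({t2[i]}), ← add_assoc, add_tsub_cancel_right]

-- a count-dict test against a counter of a window is the pvQ predicate
theorem pv_test_eq {d : PySem.Dict Char Int} {t1 : List Char} (hd : pvInv d (Multiset.ofList t1))
    (t2 : List Char) (m i : Nat) :
    pvPyDictEq d (PySem.Dict.counter ((t2.drop i).take m)) = pvQ t1 t2 m i := by
  have hiff := pvPyDictEq_iff hd (pvInv_counter ((t2.drop i).take m))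
  by_cases hq : (Multiset.ofList t1) = Multiset.ofList ((t2.drop i).take m)
  · rw [hiff.mpr hq]
    simp [pvQ, hq]
  · have : pvPyDictEq d (PySem.Dict.counter ((t2.drop i).take m)) = false := by
      rw [Bool.eq_false_iff]
      intro hcontra
      exact hq (hiff.mp hcontra)
    rw [this]
    simp [pvQ, hq]

-- the symmetric orientation (B compares window == need)
theorem pv_test_eq' {d : PySem.Dict Char Int} {t1 : List Char} (hd : pvInv d (Multiset.ofList t1))
    {w : PySem.Dict Char Int} {l : List Char} (hw : pvInv w (Multiset.ofList l))
    (t2 : List Char) (m i : Nat) (hl : Multiset.ofList l = Multiset.ofList ((t2.drop i).take m)) :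
    pvPyDictEq w d = pvQ t1 t2 m i := by
  have hiff := pvPyDictEq_iff hw hd
  by_cases hq : (Multiset.ofList t1) = Multiset.ofList ((t2.drop i).take m)
  · rw [hiff.mpr (by rw [hl, hq])]
    simp [pvQ, hq]
  · have : pvPyDictEq w d = false := by
      rw [Bool.eq_false_iff]
      intro hcontra
      exact hq (by rw [← hiff.mp hcontra, hl])
    rw [this]
    simp [pvQ, hq]

theorem pvAWhile_eq (t1 t2 : List Char) (m n : Nat)
    (d : PySem.Dict Char Int) (hd : pvInv d (Multiset.ofList t1)) (start : Nat) :
    pvAWhile d t2 m n start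
      = if (List.range' start (n - m + 1 - start)).any (pvQ t1 t2 m) then 1 else 0 := by
  obtain ⟨k, hk⟩ : ∃ k, n - m + 1 - start = k := ⟨_, rfl⟩
  induction k generalizing start with
  | zero =>
    rw [pvAWhile, if_neg (by omega), hk]
    simp
  | succ k ih =>
    have hlt : start < n - m + 1 := by omega
    rw [pvAWhile, if_pos hlt]
    simp only []
    have hsl : PySem.List.slice t2 (some (start : Int)) (some ((start : Int) + (m : Int)))
        = (t2.drop start).take m := PySem.List.slice_natCast_add t2 start m
    rw [hsl, pvCreateCountDict_eq, pv_test_eq hd t2 m start]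
    rw [hk, List.range'_succ, List.any_cons]
    by_cases hq : pvQ t1 t2 m start = true
    · rw [if_pos hq, hq]
      simp
    · rw [if_neg hq, ih (start + 1) (by omega)]
      simp only [Bool.not_eq_true] at hq
      rw [hq]
      have hlen2 : n - m + 1 - (start + 1) = k := by omega
      rw [hlen2, Bool.false_or]

theorem pvBLoop_eq (t1 t2 : List Char) (m n : Nat) (hn : n = t2.length)
    (need : PySem.Dict Char Int) (hneed : pvInv need (Multiset.ofList t1)) :
    ∀ i window, m ≤ i → i ≤ n → pvInv window (Multiset.ofList ((t2.drop (i - m)).take m)) →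
    pvBLoop need t2 m window i n
      = if (List.range' (i - m + 1) (n - i)).any (pvQ t1 t2 m) then 1 else 0 := by
  intro i window hmi hin hwin
  obtain ⟨k, hk⟩ : ∃ k, n - i = k := ⟨_, rfl⟩
  induction k generalizing i window with
  | zero =>
    rw [pvBLoop, if_neg (by omega), hk]
    simp
  | succ k ih =>
    have hlt : i < n := by omega
    have hilen : i < t2.length := by omega
    rw [pvBLoop, if_pos hlt]
    simp only []
    have hc : PySem.List.pyGetD t2 (i : Int) ' ' = t2[i] := by
      rw [PySem.List.pyGetD_natCast, List.getD_eq_getElem t2 ' ' hilen]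
    have hsub : (i : Int) - (m : Int) = ((i - m : Nat) : Int) := by
      push_cast [Nat.cast_sub hmi]; ring
    have hd : PySem.List.pyGetD t2 ((i : Int) - (m : Int)) ' ' = t2[i - m] := by
      rw [hsub, PySem.List.pyGetD_natCast, List.getD_eq_getElem t2 ' ' (by omega)]
    rw [hc, hd]
    have he : t2[i - m] ∈ Multiset.ofList ((t2.drop (i - m)).take m) + {t2[i]} := by
      cases m with
      | zero =>
        rw [Multiset.mem_add]
        right
        exact Multiset.mem_singleton.mpr rfl
      | succ k' =>
        rw [Multiset.mem_add]
        left
        have hjl : i - (k' + 1) < t2.length := by omega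
        have h1 : t2.drop (i - (k' + 1)) = t2[i - (k' + 1)] :: t2.drop (i - (k' + 1) + 1) :=
          List.drop_eq_getElem_cons hjl
        rw [h1, List.take_succ_cons]
        exact List.mem_cons_self
    have hstep := pvInv_step window (Multiset.ofList ((t2.drop (i - m)).take m)) hwin t2[i] t2[i - m] he
    simp only [] at hstep
    rw [← pv_window_slide t2 m i hmi hilen] at hstep
    have htest := pv_test_eq' hneed hstep t2 m (i - m + 1) rfl
    rw [htest]
    rw [hk, List.range'_succ, List.any_cons]
    by_cases hq : pvQ t1 t2 m (i - m + 1) = true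
    · rw [if_pos hq, hq]
      simp
    · rw [if_neg hq]
      have harg : i + 1 - m = i - m + 1 := by omega
      have hrec := ih (i + 1) _ (by omega) (by omega) (by rw [harg]; exact hstep) (by omega)
      rw [hrec]
      simp only [Bool.not_eq_true] at hq
      rw [hq]
      have h2 : i + 1 - m + 1 = i - m + 2 := by omega
      have h3 : n - (i + 1) = k := by omega
      rw [h2, h3, Bool.false_or]

-- ===== VERDICT (by name: the statement is the Claim_ definition above) =====
theorem checkifStringOneisShuffledSubStringOfStringTwo_spec : Claim_equal_checkifStringOneisShuffledSubStringOfStringTwo := by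
  unfold Claim_equal_checkifStringOneisShuffledSubStringOfStringTwo
  intro s1 s2 _
  unfold Spec_checkifStringOneisShuffledSubStringOfStringTwo
  unfold checkifStringOneisShuffledSubStringOfStringTwo checkifStringOneisShuffledSubStringOfStringTwo_alt
  dsimp only
  set t1 := s1.toList with ht1
  set t2 := s2.toList with ht2
  by_cases hmn : t1.length > t2.length
  · rw [if_pos hmn, if_pos hmn]
  · rw [if_neg hmn, if_neg hmn]
    have hmle : t1.length ≤ t2.length := by omega
    set m := t1.length with hm
    set n := t2.length with hnn
    -- both first tests are pvQ t1 t2 m 0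
    have hsl : PySem.List.slice t2 none (some (m : Int)) = (t2.drop 0).take m := by
      rw [PySem.List.slice_to_natCast, List.drop_zero]
    have hinv1 : pvInv (pvCreateCountDict (PySem.List.sorted t1 (fun c => c) false)) (Multiset.ofList t1) := by
      rw [pvCreateCountDict_eq]
      have hperm : Multiset.ofList (PySem.List.sorted t1 (fun c => c) false) = Multiset.ofList t1 :=
        Multiset.coe_eq_coe.mpr (PySem.List.sorted_perm t1 (fun c => c) false)
      rw [← hperm]
      exact pvInv_counter _
    have hneed : pvInv (t1.foldl (fun d c => d.insert c (d.getD c 0 + 1)) PySem.Dict.empty) (Multiset.ofList t1) := by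
      rw [PySem.Dict.foldl_insert_getD_add_one_eq_counter]
      exact pvInv_counter t1
    have hwin0 : pvInv ((PySem.List.slice t2 none (some (m : Int))).foldl (fun d c => d.insert c (d.getD c 0 + 1)) PySem.Dict.empty)
        (Multiset.ofList ((t2.drop 0).take m)) := by
      rw [PySem.Dict.foldl_insert_getD_add_one_eq_counter, hsl]
      exact pvInv_counter _
    have htA : pvPyDictEq (pvCreateCountDict (PySem.List.slice t2 none (some (m : Int))))
        (pvCreateCountDict (PySem.List.sorted t1 (fun c => c) false)) = pvQ t1 t2 m 0 := by
      apply pv_test_eq' hinv1 _ t2 m 0 rfl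
      rw [hsl, pvCreateCountDict_eq]
      exact pvInv_counter _
    have htB : pvPyDictEq ((PySem.List.slice t2 none (some (m : Int))).foldl (fun d c => d.insert c (d.getD c 0 + 1)) PySem.Dict.empty)
        (t1.foldl (fun d c => d.insert c (d.getD c 0 + 1)) PySem.Dict.empty) = pvQ t1 t2 m 0 :=
      pv_test_eq' hneed hwin0 t2 m 0 rfl
    rw [htA, htB]
    by_cases hq0 : pvQ t1 t2 m 0 = true
    · rw [if_pos hq0, if_pos hq0]
    · rw [if_neg hq0, if_neg hq0]
      rw [pvAWhile_eq t1 t2 m n _ hinv1 1]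
      rw [pvBLoop_eq t1 t2 m n rfl _ hneed m _ (by omega) (by omega)
        (by rw [Nat.sub_self]; exact hwin0)]
      have h1 : m - m + 1 = 1 := by omega
      have h2 : n - m + 1 - 1 = n - m := by omega
      rw [h1, h2]
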